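-- pv_equiv track=rewrite | github.com/j1u/UCSD | DSC20/hw06.py | skip_then_swap
-- ===== SOURCE A (Python) =====
-- def skip_then_swap(string, n_skip, n_swap):
--     """
--     Function that takes a string, skips the first n_skip character pairs,
--     then swaps the next n_swap character pairs.
--
--     Params
--     -----------------------------------
--     string : string
--         String to be manipulated
--     n_skip : string
--         number of ith pairs to skip
--     n_swap : string
--         The integer to be added
--
--     Returns
--     -----------------------------------
--     int
--         returns single digit number
--
--     >>> skip_then_swap('kkkABXXXXCDkkk', 3, 2)
--     'kkkDCXXXXBAkkk'
--     >>> skip_then_swap('DSC20', 1, 2)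
--     'D2CS0'
--     >>> skip_then_swap('skip_then_swap', 4, 3)
--     'skip_neht_swap'
--     >>> skip_then_swap('bonks', 2, 1)
--     'bonks'
--     >>> skip_then_swap('Racecar', 0, 1)
--     'racecaR'
--     >>> skip_then_swap('Nikola Jokic', 2, 3)
--     'NikoJa lokic'
--     """
--     if len(string) == 1:
--         return string
--     if len(string) < 1:
--         return ''
--     if n_skip > 0:
--         return string[0] + skip_then_swap(string[1:-1], n_skip - 1, n_swap) + \
--                string[-1]
--     if n_swap > 0:
--         return string[-1] + skip_then_swap(string[1:-1], n_skip, n_swap - 1) + \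
--                string[0]
--     return string[0] + skip_then_swap(string[1:-1], n_skip, n_swap) + string[-1]
-- ===== SOURCE B (Python) =====
-- def skip_then_swap(string, n_skip, n_swap):
--     n = len(string)
--     lo = n_skip if n_skip > 0 else 0
--     hi = lo + (n_swap if n_swap > 0 else 0)
--     return ''.join(
--         string[n - 1 - i] if lo <= min(i, n - 1 - i) < hi else string[i]
--         for i in range(n)
--     )
-- ===== Notes on version B (the rewrite author's own statement) =====
-- stated objective: faster
-- what changed: Replaced A's outside-in recursion (which slices a fresh string at every level) by a single non-recursive pass that computes each output character directly from its index via the swap band [lo, hi) of pair indices.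
import Mathlib
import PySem

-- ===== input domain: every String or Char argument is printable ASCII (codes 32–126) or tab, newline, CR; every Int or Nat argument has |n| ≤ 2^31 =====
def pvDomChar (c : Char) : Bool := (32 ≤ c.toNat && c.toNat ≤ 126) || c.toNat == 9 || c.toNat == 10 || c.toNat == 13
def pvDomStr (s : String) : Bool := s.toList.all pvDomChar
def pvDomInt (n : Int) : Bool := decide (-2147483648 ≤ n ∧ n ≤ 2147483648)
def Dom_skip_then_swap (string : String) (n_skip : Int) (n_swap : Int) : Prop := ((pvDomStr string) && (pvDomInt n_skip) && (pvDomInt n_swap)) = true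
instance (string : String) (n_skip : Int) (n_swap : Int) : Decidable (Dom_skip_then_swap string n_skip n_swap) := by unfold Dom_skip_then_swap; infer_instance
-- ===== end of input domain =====

-- B replaces A's O(n^2) outside-in recursion (with string slicing at every level) by a
-- single O(n) indexed pass that reads each output character directly; objective: faster.


-- ===== PORT A =====
-- A's recursion, transliterated on the character list (string ops via PySem):
-- len(string)==1 → string; len(string)<1 → ''; then the three branches on
-- string[0] / string[1:-1] / string[-1] exactly as in the Python.
def pvGoA : Nat → List Char → Int → Int → List Char
  | 0, l, _, _ => l        -- fuel = len(string); fuel 0 means the empty string: return ''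
  | fuel + 1, l, n_skip, n_swap =>
    if l.length = 1 then l
    else if l.length < 1 then []
    else
      if n_skip > 0 then
        [PySem.List.pyGetD l 0 ' '] ++
          pvGoA fuel (PySem.List.slice l (some 1) (some (-1))) (n_skip - 1) n_swap ++
          [PySem.List.pyGetD l (-1) ' ']
      else if n_swap > 0 then
        [PySem.List.pyGetD l (-1) ' '] ++
          pvGoA fuel (PySem.List.slice l (some 1) (some (-1))) n_skip (n_swap - 1) ++
          [PySem.List.pyGetD l 0 ' ']
      else
        [PySem.List.pyGetD l 0 ' '] ++
          pvGoA fuel (PySem.List.slice l (some 1) (some (-1))) n_skip n_swap ++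
          [PySem.List.pyGetD l (-1) ' ']

def skip_then_swap (string : String) (n_skip : Int) (n_swap : Int) : String :=
  String.mk (pvGoA string.toList.length string.toList n_skip n_swap)

-- ===== PORT B =====
-- B: one pass over range(n); output position i takes string[n-1-i] when the pair
-- index min(i, n-1-i) lies in the swap band [lo, hi), else string[i].
def skip_then_swap_alt (string : String) (n_skip : Int) (n_swap : Int) : String :=
  let l := string.toList
  let n : Int := l.length
  let lo : Int := if n_skip > 0 then n_skip else 0
  let hi : Int := lo + (if n_swap > 0 then n_swap else 0)
  String.mk ((PySem.List.pyRange 0 n 1).map (fun i =>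
    if lo ≤ min i (n - 1 - i) ∧ min i (n - 1 - i) < hi then
      PySem.List.pyGetD l (n - 1 - i) ' '
    else
      PySem.List.pyGetD l i ' '))

-- ===== PRECONDITION & SPEC =====
def Spec_skip_then_swap (string : String) (n_skip : Int) (n_swap : Int) (out : String) : Prop := out = skip_then_swap_alt string n_skip n_swap
instance (string : String) (n_skip : Int) (n_swap : Int) (out : String) : Decidable (Spec_skip_then_swap string n_skip n_swap out) := by unfold Spec_skip_then_swap; infer_instance

-- ===== CLAIM (what is proved, stated in full; the proofs are below) =====
def Claim_equal_skip_then_swap : Prop := ∀ (string : String) (n_skip : Int) (n_swap : Int), Dom_skip_then_swap string n_skip n_swap → Spec_skip_then_swap string n_skip n_swap (skip_then_swap string n_skip n_swap)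

-- ===== LEMMAS AND PROOFS =====

-- The common indexed form both ports are reduced to: position k of the output takes
-- l[n-1-k] when the pair index min(k, n-1-k) lies in [lo, hi), else l[k].
def pvBidx (l : List Char) (lo hi : Int) : List Char :=
  (List.range l.length).map (fun (k : Nat) =>
    if lo ≤ min (k : Int) ((l.length : Int) - 1 - (k : Int)) ∧
        min (k : Int) ((l.length : Int) - 1 - (k : Int)) < hi then
      l.getD ((l.length : Int) - 1 - (k : Int)).toNat ' '
    else
      l.getD k ' ')

lemma pvBidx_id (l : List Char) (lo hi : Int) (h : hi ≤ lo) : pvBidx l lo hi = l := by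
  unfold pvBidx
  rw [List.map_congr_left (g := fun k => l.getD k ' ') (by intro k hk; rw [if_neg]; omega)]
  apply List.ext_getElem (by simp)
  intro i h1 h2
  simp only [List.getElem_map, List.getElem_range]
  exact List.getD_eq_getElem l ' ' h2

lemma map_range_peel {α : Type} (f : Nat → α) (N : Nat) :
    (List.range (N+2)).map f = f 0 :: ((List.range N).map (fun k => f (k+1)) ++ [f (N+1)]) := by
  rw [show N+2 = (N+1)+1 from rfl, List.range_succ, List.map_append, List.range_succ_eq_map]
  simp [Function.comp]

lemma pvBidx_skip (c d : Char) (m : List Char) (lo hi : Int) (h : 1 ≤ lo) :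
    pvBidx (c :: (m ++ [d])) lo hi = c :: (pvBidx m (lo-1) (hi-1) ++ [d]) := by
  unfold pvBidx
  have hlen : (c :: (m ++ [d])).length = m.length + 2 := by simp
  rw [hlen, map_range_peel]
  congr 1
  · rw [if_neg (by push_cast; omega)]; rfl
  congr 1
  · apply List.map_congr_left
    intro k hk
    simp only [List.mem_range] at hk
    push_cast
    refine if_congr (by omega) ?_ ?_
    · rw [show ((m.length:Int) + 2 - 1 - ((k:Int) + 1)).toNat = (m.length - 1 - k) + 1 by omega,
          show ((m.length:Int) - 1 - (k:Int)).toNat = m.length - 1 - k by omega,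
          List.getD_cons_succ, List.getD_append _ _ _ _ (by omega)]
    · rw [List.getD_cons_succ, List.getD_append _ _ _ _ (by omega)]
  · rw [if_neg (by push_cast; omega),
        show (c :: (m ++ [d])) = (c :: m) ++ [d] by simp,
        List.getD_append_right _ _ _ _ (by simp)]
    simp

lemma pvBidx_swap (c d : Char) (m : List Char) (hi : Int) (h : 1 ≤ hi) :
    pvBidx (c :: (m ++ [d])) 0 hi = d :: (pvBidx m 0 (hi-1) ++ [c]) := by
  unfold pvBidx
  have hlen : (c :: (m ++ [d])).length = m.length + 2 := by simp
  rw [hlen, map_range_peel]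
  congr 1
  · rw [if_pos (by push_cast; omega),
        show (((m.length + 2 : Nat) : Int) - 1 - ((0 : Nat) : Int)).toNat = m.length + 1 by
          push_cast; omega,
        show (c :: (m ++ [d])) = (c :: m) ++ [d] by simp,
        List.getD_append_right _ _ _ _ (by simp)]
    simp
  congr 1
  · apply List.map_congr_left
    intro k hk
    simp only [List.mem_range] at hk
    push_cast
    refine if_congr (by omega) ?_ ?_
    · rw [show ((m.length:Int) + 2 - 1 - ((k:Int) + 1)).toNat = (m.length - 1 - k) + 1 by omega,
          show ((m.length:Int) - 1 - (k:Int)).toNat = m.length - 1 - k by omega,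
          List.getD_cons_succ, List.getD_append _ _ _ _ (by omega)]
    · rw [List.getD_cons_succ, List.getD_append _ _ _ _ (by omega)]
  · rw [if_pos (by push_cast; omega),
        show (((m.length + 2 : Nat) : Int) - 1 - ((m.length + 1 : Nat) : Int)).toNat = 0 by
          push_cast; omega]
    rfl

lemma pvSlice11 (l : List Char) (h : 2 ≤ l.length) :
    PySem.List.slice l (some 1) (some (-1)) = l.tail.dropLast := by
  have hne : l ≠ [] := by intro e; simp [e] at h
  simp [PySem.List.slice, PySem.List.clampIdx, hne]
  rw [show (↑l.length + (-1:Int)).toNat = l.length - 1 by omega,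
      show min 1 l.length = 1 by omega, List.dropLast_eq_take, ← List.drop_one,
      List.length_drop]

lemma pvSlice_mid (c d : Char) (m : List Char) :
    PySem.List.slice (c :: (m ++ [d])) (some 1) (some (-1)) = m := by
  rw [pvSlice11 _ (by simp)]
  simp

lemma pvAlt_eq (s : String) (sk sw : Int) :
    skip_then_swap_alt s sk sw
      = String.mk (pvBidx s.toList (if sk > 0 then sk else 0)
          ((if sk > 0 then sk else 0) + if sw > 0 then sw else 0)) := by
  simp only [skip_then_swap_alt]
  unfold pvBidx
  congr 1
  rw [PySem.List.pyRange_one, List.map_map]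
  rw [show ((s.toList.length : Int) - 0).toNat = s.toList.length by omega]
  apply List.map_congr_left
  intro k hk
  simp only [List.mem_range] at hk
  simp only [Function.comp_apply, zero_add]
  refine if_congr (by omega) ?_ ?_
  · rw [PySem.List.pyGetD_eq_getElem _ _ (by omega) (by omega),
        List.getD_eq_getElem _ _ (by omega)]
  · rw [PySem.List.pyGetD_natCast]

lemma pvGoA_eq (fuel : Nat) : ∀ (l : List Char) (sk sw : Int), l.length ≤ fuel →
    pvGoA fuel l sk sw
      = pvBidx l (if sk > 0 then sk else 0)
          ((if sk > 0 then sk else 0) + if sw > 0 then sw else 0) := by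
  induction fuel with
  | zero =>
    intro l sk sw hf
    have : l = [] := List.eq_nil_of_length_eq_zero (by omega)
    subst this
    rfl
  | succ fuel ih =>
    intro l sk sw hf
    by_cases h1 : l.length = 1
    · obtain ⟨a, rfl⟩ := List.length_eq_one_iff.mp h1
      show [a] = pvBidx [a] _ _
      unfold pvBidx
      simp only [List.length_cons, List.length_nil, List.range_succ, List.range_zero,
        List.map_cons, List.map_nil, List.nil_append]
      split <;> simp
    · by_cases h0 : l.length < 1
      · have : l = [] := List.eq_nil_of_length_eq_zero (by omega)
        subst this
        rfl
      · have h2 : 2 ≤ l.length := by omega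
        obtain ⟨c, t, rfl⟩ : ∃ c t, l = c :: t := by
          cases l with
          | nil => simp at h2
          | cons c t => exact ⟨c, t, rfl⟩
        have ht : t ≠ [] := by intro e; subst e; simp at h2
        obtain ⟨m, d, rfl⟩ : ∃ m d, t = m ++ [d] :=
          ⟨t.dropLast, t.getLast ht, (List.dropLast_concat_getLast ht).symm⟩
        have hmf : m.length ≤ fuel := by simp at hf; omega
        show (if (c :: (m ++ [d])).length = 1 then _ else _) = _
        rw [if_neg h1, if_neg (by omega)]
        rw [pvSlice_mid]
        by_cases hsk : 0 < sk
        · rw [if_pos hsk, PySem.List.pyGetD_zero_cons,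
              show (c :: (m ++ [d])) = (c :: m) ++ [d] by simp,
              PySem.List.pyGetD_neg_one_append_singleton,
              show (c :: m) ++ [d] = c :: (m ++ [d]) by simp,
              ih m _ _ hmf,
              pvBidx_skip c d m (if sk > 0 then sk else 0)
                ((if sk > 0 then sk else 0) + if sw > 0 then sw else 0) (by split <;> omega)]
          rw [show (if sk > 0 then sk else 0) - 1 = (if sk - 1 > 0 then sk - 1 else 0) by
                split <;> split <;> omega,
              show ((if sk > 0 then sk else 0) + if sw > 0 then sw else 0) - 1
                  = (if sk - 1 > 0 then sk - 1 else 0) + (if sw > 0 then sw else 0) by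
                split <;> split <;> split <;> omega]
          rfl
        · rw [if_neg (by omega)]
          by_cases hsw : 0 < sw
          · rw [if_pos hsw, PySem.List.pyGetD_zero_cons,
                show (c :: (m ++ [d])) = (c :: m) ++ [d] by simp,
                PySem.List.pyGetD_neg_one_append_singleton,
                show (c :: m) ++ [d] = c :: (m ++ [d]) by simp,
                ih m _ _ hmf,
                show (if sk > 0 then sk else 0) = 0 from if_neg (by omega)]
            rw [pvBidx_swap c d m (0 + if sw > 0 then sw else 0) (by split <;> omega),
                show (0 + if sw > 0 then sw else 0) - 1
                    = 0 + (if sw - 1 > 0 then sw - 1 else 0) by split <;> split <;> omega]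
            rfl
          · rw [if_neg hsw, PySem.List.pyGetD_zero_cons,
                show (c :: (m ++ [d])) = (c :: m) ++ [d] by simp,
                PySem.List.pyGetD_neg_one_append_singleton,
                show (c :: m) ++ [d] = c :: (m ++ [d]) by simp,
                ih m _ _ hmf,
                show (if sk > 0 then sk else 0) = 0 from if_neg (by omega),
                show (if sw > 0 then sw else 0) = 0 from if_neg (by omega),
                pvBidx_id m 0 (0 + 0) (by omega),
                pvBidx_id (c :: (m ++ [d])) 0 (0 + 0) (by omega)]
            rfl

-- ===== VERDICT (by name: the statement is the Claim_ definition above) =====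
theorem skip_then_swap_spec : Claim_equal_skip_then_swap := by
  intro s sk sw _
  unfold Spec_skip_then_swap
  rw [pvAlt_eq]
  unfold skip_then_swap
  rw [pvGoA_eq _ _ _ _ le_rfl]
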